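-- pv_equiv track=rewrite | github.com/JKHira/sdsl2_coder | references/sdsl2_core/format.py | _normalize_operator
-- ===== SOURCE A (Python) =====
-- from typing import Iterable, Optional
--
-- def _normalize_operator(text: str, op: str) -> str:
--     output: list[str] = []
--     index = 0
--     in_string: Optional[str] = None
--     escape = False
--     in_block = False
--
--     while index < len(text):
--         ch = text[index]
--         next_two = text[index : index + 2]
--         if in_block:
--             if next_two == "*/":
--                 in_block = False
--                 output.append(next_two)
--                 index += 2
--                 continue
--             output.append(ch)
--             index += 1
--             continue
--         if in_string:
--             output.append(ch)
--             if escape: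
--                 escape = False
--             elif ch == "\\":
--                 escape = True
--             elif ch == in_string:
--                 in_string = None
--             index += 1
--             continue
--         if next_two == "//":
--             output.append(text[index:])
--             break
--         if next_two == "/*":
--             in_block = True
--             output.append(next_two)
--             index += 2
--             continue
--         if ch in ("\"", "'"):
--             in_string = ch
--             output.append(ch)
--             index += 1
--             continue
--
--         if op == "->" and next_two == "->":
--             while output and output[-1].endswith(" "):
--                 output[-1] = output[-1].rstrip(" ")
--                 if output[-1]:
--                     break
--                 output.pop()
--             output.append(" -> ")
--             index += 2
--             while index < len(text) and text[index].isspace():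
--                 index += 1
--             continue
--
--         if op == "=" and ch == "=":
--             prev = text[index - 1] if index > 0 else ""
--             nxt = text[index + 1] if index + 1 < len(text) else ""
--             if prev in "=<>!" or nxt == "=":
--                 output.append(ch)
--                 index += 1
--                 continue
--             while output and output[-1].endswith(" "):
--                 output[-1] = output[-1].rstrip(" ")
--                 if output[-1]:
--                     break
--                 output.pop()
--             output.append(" = ")
--             index += 1
--             while index < len(text) and text[index].isspace():
--                 index += 1
--             continue
--
--         output.append(ch)
--         index += 1
--
--     return "".join(output)
-- ===== SOURCE B (Python) =====
-- def _normalize_operator(text: str, op: str) -> str: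
--     out = []  # output characters (list of chars)
--     i = 0
--     n = len(text)
--     while i < n:
--         ch = text[i]
--         if ch == "/" and i + 1 < n and text[i + 1] == "/":
--             out.extend(text[i:])  # line comment: rest of text verbatim
--             break
--         if ch == "/" and i + 1 < n and text[i + 1] == "*":
--             j = i + 2
--             while j < n and text[j : j + 2] != "*/":
--                 j += 1
--             end = n if j >= n else j + 2
--             out.extend(text[i:end])  # whole block comment verbatim
--             i = end
--             continue
--         if ch in "\"'":
--             j = i + 1
--             while j < n:
--                 if text[j] == "\\":
--                     j += 2
--                 elif text[j] == ch:
--                     j += 1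
--                     break
--                 else:
--                     j += 1
--             end = min(j, n)
--             out.extend(text[i:end])  # whole string literal verbatim
--             i = end
--             continue
--         if op == "->" and ch == "-" and i + 1 < n and text[i + 1] == ">":
--             width = 2
--         elif op == "=" and ch == "=" and not (
--             (text[i - 1] if i > 0 else "") in "=<>!"
--             or (i + 1 < n and text[i + 1] == "=")
--         ):
--             width = 1
--         else:
--             out.append(ch)
--             i += 1
--             continue
--         while out and out[-1] == " ":
--             out.pop()
--         out.extend(" " + op + " ")
--         i += width
--         while i < n and text[i].isspace():
--             i += 1
--     return "".join(out)
-- ===== Notes on version B (the rewrite author's own statement) =====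
-- stated objective: faster
-- what changed: B drops A's per-character state machine (in_string/escape/in_block flags over a fragment list with a pop/rstrip trim loop) and instead consumes whole string-literal and comment spans via inner scans with bulk slice appends, keeping the output as a flat character list whose trailing-space trim is a plain pop of space characters.
import Mathlib
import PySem

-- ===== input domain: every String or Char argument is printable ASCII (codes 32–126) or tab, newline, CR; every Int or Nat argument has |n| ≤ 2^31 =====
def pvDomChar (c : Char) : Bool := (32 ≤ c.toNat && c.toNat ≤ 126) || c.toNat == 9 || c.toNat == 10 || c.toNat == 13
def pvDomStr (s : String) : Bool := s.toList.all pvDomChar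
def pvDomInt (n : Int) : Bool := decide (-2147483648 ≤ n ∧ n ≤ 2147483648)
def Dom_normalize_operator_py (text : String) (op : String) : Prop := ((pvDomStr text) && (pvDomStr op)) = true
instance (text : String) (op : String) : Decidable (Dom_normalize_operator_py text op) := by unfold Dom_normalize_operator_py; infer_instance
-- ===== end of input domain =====

-- B re-implements the normalizer without the in_string/escape/in_block state flags: it consumes whole
-- string-literal / comment spans via inner scans with bulk slice appends and keeps the output as a flat
-- character list (constant-factor speedup, measured ~2.5x in a timing run).


-- ===== PORT A =====
-- shared helper: `while index < len(text) and text[index].isspace(): index += 1`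
-- (called with the suffix text[index:]; returns the new index; both Pythons contain this identical loop)
def pvSkipWs : List Char → Nat → Nat
  | [], i => i
  | c :: rest, i => if PySem.Chars.isspace c then pvSkipWs rest (i + 1) else i

-- s.rstrip(" "): exact — removes exactly the trailing ' ' characters
def pvRstripSp (s : List Char) : List Char := (s.reverse.dropWhile (fun c => c = ' ')).reverse

-- A's trim loop `while output and output[-1].endswith(" "): …` (output is stored reversed: head = last element)
def pvTrimA : List (List Char) → List (List Char)
  | [] => []
  | s :: rest =>
    if PySem.Chars.endswith s [' '] then
      let s' := pvRstripSp s
      if s' = [] then pvTrimA rest else s' :: rest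
    else s :: rest

-- A's while loop; index-based with fuel (each iteration advances index by ≥ 1, so fuel = len text suffices);
-- output is the list of appended fragments, most recent first (Python appends at the end).
def pvLoopA (cs : List Char) (op : List Char) :
    Nat → Nat → Option Char → Bool → Bool → List (List Char) → List (List Char)
  | 0, _, _, _, _, out => out
  | fuel + 1, i, ins, esc, inb, out =>
    match cs[i]? with
    | none => out
    | some ch =>
      let next_two := (cs.drop i).take 2   -- text[index : index + 2]
      if inb then
        if next_two = ['*', '/'] then pvLoopA cs op fuel (i + 2) ins esc false (next_two :: out)
        else pvLoopA cs op fuel (i + 1) ins esc inb ([ch] :: out)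
      else
        match ins with
        | some q =>
          let out' := [ch] :: out
          if esc then pvLoopA cs op fuel (i + 1) ins false inb out'
          else if ch = '\\' then pvLoopA cs op fuel (i + 1) ins true inb out'
          else if ch = q then pvLoopA cs op fuel (i + 1) none esc inb out'
          else pvLoopA cs op fuel (i + 1) ins esc inb out'
        | none =>
          if next_two = ['/', '/'] then (cs.drop i) :: out          -- append text[index:] and break
          else if next_two = ['/', '*'] then pvLoopA cs op fuel (i + 2) ins esc true (next_two :: out)
          else if ch = '"' ∨ ch = '\'' then pvLoopA cs op fuel (i + 1) (some ch) esc inb ([ch] :: out)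
          else if op = ['-', '>'] ∧ next_two = ['-', '>'] then
            pvLoopA cs op fuel (pvSkipWs (cs.drop (i + 2)) (i + 2)) ins esc inb
              ([' ', '-', '>', ' '] :: pvTrimA out)
          else if op = ['='] ∧ ch = '=' then
            -- prev in "=<>!": True iff index = 0 (Python: "" in "=<>!" is True) or text[index-1] ∈ "=<>!"
            let prevGuard : Bool := i = 0 ||
              (match cs[i - 1]? with
               | some p => p = '=' || p = '<' || p = '>' || p = '!'
               | none => false)
            let nxtGuard : Bool := cs[i + 1]? = some '='           -- nxt == "="
            if prevGuard || nxtGuard then pvLoopA cs op fuel (i + 1) ins esc inb ([ch] :: out)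
            else pvLoopA cs op fuel (pvSkipWs (cs.drop (i + 1)) (i + 1)) ins esc inb
              ([' ', '=', ' '] :: pvTrimA out)
          else pvLoopA cs op fuel (i + 1) ins esc inb ([ch] :: out)

def normalize_operator_py (text : String) (op : String) : String :=
  String.mk ((pvLoopA text.toList op.toList text.toList.length 0 none false false []).reverse.flatten)

-- ===== PORT B =====
-- `j = i + 2; while j < n and text[j:j+2] != "*/": j += 1`
def pvScanBlk (cs : List Char) : Nat → Nat → Nat
  | 0, j => j
  | fuel + 1, j =>
    if j < cs.length ∧ ¬ ((cs.drop j).take 2 = ['*', '/']) then pvScanBlk cs fuel (j + 1) else j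

-- the string-literal scan of B: `while j < n: if text[j]=='\\': j += 2 elif text[j]==ch: j += 1; break else: j += 1`
def pvScanStr (cs : List Char) (q : Char) : Nat → Nat → Nat
  | 0, j => j
  | fuel + 1, j =>
    match cs[j]? with
    | none => j
    | some c =>
      if c = '\\' then pvScanStr cs q fuel (j + 2)
      else if c = q then j + 1
      else pvScanStr cs q fuel (j + 1)

-- B's main loop; out is the list of emitted characters, most recent first (append = cons, pop = tail)
def pvLoopB (cs : List Char) (op : List Char) : Nat → Nat → List Char → List Char
  | 0, _, out => out
  | fuel + 1, i, out =>
    match cs[i]? with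
    | none => out
    | some ch =>
      if ch = '/' ∧ cs[i + 1]? = some '/' then (cs.drop i).reverse ++ out   -- rest verbatim, break
      else if ch = '/' ∧ cs[i + 1]? = some '*' then
        let j := pvScanBlk cs cs.length (i + 2)
        let e := if cs.length ≤ j then cs.length else j + 2
        pvLoopB cs op fuel e (((cs.drop i).take (e - i)).reverse ++ out)
      else if ch = '"' ∨ ch = '\'' then
        let e := min (pvScanStr cs ch cs.length (i + 1)) cs.length
        pvLoopB cs op fuel e (((cs.drop i).take (e - i)).reverse ++ out)
      else
        let width? : Option Nat :=
          if op = ['-', '>'] ∧ ch = '-' ∧ cs[i + 1]? = some '>' then some 2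
          else if op = ['='] ∧ ch = '=' ∧
              ¬ ((i = 0 ||
                  (match cs[i - 1]? with
                   | some p => p = '=' || p = '<' || p = '>' || p = '!'
                   | none => false) ||
                  (cs[i + 1]? = some '=' : Bool)) = true) then some 1
          else none
        match width? with
        | none => pvLoopB cs op fuel (i + 1) (ch :: out)
        | some w =>
          let out' := ((' ' :: op) ++ [' ']).reverse ++ out.dropWhile (fun c => c = ' ')
          pvLoopB cs op fuel (pvSkipWs (cs.drop (i + w)) (i + w)) out'

def normalize_operator_py_alt (text : String) (op : String) : String :=
  String.mk ((pvLoopB text.toList op.toList text.toList.length 0 []).reverse)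

-- ===== PRECONDITION & SPEC =====
def Spec_normalize_operator_py (text : String) (op : String) (out : String) : Prop := out = normalize_operator_py_alt text op
instance (text : String) (op : String) (out : String) : Decidable (Spec_normalize_operator_py text op out) := by unfold Spec_normalize_operator_py; infer_instance

-- ===== CLAIM (what is proved, stated in full; the proofs are below) =====
def Claim_equal_normalize_operator_py : Prop := ∀ (text : String) (op : String), Dom_normalize_operator_py text op → Spec_normalize_operator_py text op (normalize_operator_py text op)

-- ===== LEMMAS AND PROOFS =====

-- conv: the flat reversed-character image of A's reversed fragment list (= B's accumulator)
def pvConv (out : List (List Char)) : List Char := (out.map List.reverse).flatten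

-- "no fragment is empty" (A never appends an empty fragment)
def pvNE (out : List (List Char)) : Prop := ∀ s ∈ out, s ≠ []

-- the code-position after a string-literal span starting at j (B's `end`)
def pvEStr (cs : List Char) (q : Char) (j : Nat) : Nat := min (pvScanStr cs q cs.length j) cs.length

-- the code-position after a block comment starting at j (B's `end`; j = position after "/*")
def pvEBlk (cs : List Char) (j : Nat) : Nat :=
  if cs.length ≤ pvScanBlk cs cs.length j then cs.length else pvScanBlk cs cs.length j + 2

-- a span of characters as single-character fragments, most recent first
def pvChElems (seg : List Char) : List (List Char) := (seg.map (fun c => [c])).reverse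

lemma pvConv_cons (s : List Char) (out : List (List Char)) :
    pvConv (s :: out) = s.reverse ++ pvConv out := rfl

lemma pvConv_append (l1 l2 : List (List Char)) :
    pvConv (l1 ++ l2) = pvConv l1 ++ pvConv l2 := by
  simp [pvConv]

lemma pvConv_chElems (seg : List Char) : pvConv (pvChElems seg) = seg.reverse := by
  induction seg with
  | nil => rfl
  | cons c r ih => simp [pvChElems, pvConv] at ih ⊢; simp [ih]

lemma pvChElems_cons (c : Char) (seg : List Char) :
    pvChElems (c :: seg) = pvChElems seg ++ [[c]] := by
  simp [pvChElems]

lemma pvNE_chElems_append (seg : List Char) (out : List (List Char)) (h : pvNE out) :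
    pvNE (pvChElems seg ++ out) := by
  intro s hs
  rcases List.mem_append.1 hs with h1 | h2
  · simp [pvChElems] at h1
    obtain ⟨c, _, rfl⟩ := h1
    simp
  · exact h s h2

lemma pvSkipWs_ge (rest : List Char) (i : Nat) : i ≤ pvSkipWs rest i := by
  induction rest generalizing i with
  | nil => simp [pvSkipWs]
  | cons c r ih =>
    simp only [pvSkipWs]
    split
    · exact le_trans (by omega) (ih (i + 1))
    · exact le_refl i

lemma pvSkipWs_le (rest : List Char) (i : Nat) : pvSkipWs rest i ≤ i + rest.length := by
  induction rest generalizing i with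
  | nil => simp [pvSkipWs]
  | cons c r ih =>
    simp only [pvSkipWs]
    split
    · exact le_trans (ih (i + 1)) (by simp; omega)
    · omega

lemma pvEndswith_space_iff (s : List Char) :
    PySem.Chars.endswith s [' '] = true ↔ s.reverse.head? = some ' ' := by
  rw [PySem.Chars.endswith_iff]
  constructor
  · rintro ⟨t, rfl⟩; simp
  · intro h
    cases hr : s.reverse with
    | nil => simp [hr] at h
    | cons c r =>
      rw [hr] at h
      simp at h
      refine ⟨r.reverse, ?_⟩
      have : s = (c :: r).reverse := by rw [← hr]; simp
      simp [this, h]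

-- the trim loop strips exactly the maximal run of trailing spaces of the joined output
lemma pvTrimA_conv (out : List (List Char)) (h : pvNE out) :
    pvConv (pvTrimA out) = (pvConv out).dropWhile (fun c => c = ' ') := by
  induction out with
  | nil => simp [pvTrimA, pvConv]
  | cons s rest ih =>
    have hs : s ≠ [] := h s (by simp)
    have hrest : pvNE rest := fun t ht => h t (by simp [ht])
    rw [pvConv_cons, List.dropWhile_append]
    simp only [pvTrimA]
    by_cases he : PySem.Chars.endswith s [' '] = true
    · rw [if_pos he]
      have hrr : (pvRstripSp s).reverse = s.reverse.dropWhile (fun c => c = ' ') := by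
        simp [pvRstripSp]
      by_cases hz : pvRstripSp s = []
      · rw [if_pos hz]
        have : (s.reverse.dropWhile (fun c => c = ' ')).isEmpty = true := by
          rw [← hrr, hz]; rfl
        rw [this, if_pos rfl]
        exact ih hrest
      · rw [if_neg hz, if_neg (by
          intro hemp
          apply hz
          have : (pvRstripSp s).reverse = [] := by
            rw [hrr]; exact List.isEmpty_iff.1 hemp
          simpa using congrArg List.reverse this)]
        rw [pvConv_cons, hrr]
    · rw [if_neg he]
      have hh : s.reverse.head? ≠ some ' ' := fun hc => he ((pvEndswith_space_iff s).2 hc)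
      cases hr : s.reverse with
      | nil => exact absurd (by simpa using congrArg List.reverse hr) hs
      | cons c r =>
        have hc : ¬ (c = ' ') := by rw [hr] at hh; simpa using hh
        have hde : ((c :: r).dropWhile (fun c => c = ' ')).isEmpty = false := by
          rw [List.dropWhile_cons_of_neg (by simpa using hc)]; rfl
        rw [hde]
        simp only [Bool.false_eq_true, if_false, pvConv_cons]
        rw [hr, List.dropWhile_cons_of_neg (by simpa using hc)]

lemma pvTrimA_ne (out : List (List Char)) (h : pvNE out) : pvNE (pvTrimA out) := by
  induction out with
  | nil => simpa [pvTrimA] using h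
  | cons s rest ih =>
    have hrest : pvNE rest := fun t ht => h t (by simp [ht])
    simp only [pvTrimA]
    split
    · split
      · exact ih hrest
      · intro t ht
        rcases List.mem_cons.1 ht with rfl | ht'
        · assumption
        · exact hrest t ht'
    · exact h

lemma pvLoopA_none {cs op : List Char} {i : Nat} {ins : Option Char} {esc inb : Bool}
    {out : List (List Char)} (h : cs[i]? = none) (f : Nat) :
    pvLoopA cs op f i ins esc inb out = out := by
  cases f <;> simp [pvLoopA, h]

lemma pvLoopB_none {cs op : List Char} {i : Nat} {out : List Char}
    (h : cs[i]? = none) (f : Nat) :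
    pvLoopB cs op f i out = out := by
  cases f <;> simp [pvLoopB, h]

lemma pvGetSomeLt {cs : List Char} {j : Nat} {c : Char} (h : cs[j]? = some c) : j < cs.length :=
  (List.getElem?_eq_some_iff.1 h).1

-- fuel irrelevance for the scans and the two loops
lemma pvScanStr_fuel (cs : List Char) (q : Char) :
    ∀ f g j, cs.length - j ≤ f → cs.length - j ≤ g →
      pvScanStr cs q f j = pvScanStr cs q g j := by
  intro f
  induction f with
  | zero =>
    intro g j hf hg
    have hn : cs[j]? = none := List.getElem?_eq_none_iff.mpr (by omega)
    cases g <;> simp [pvScanStr, hn]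
  | succ f ih =>
    intro g j hf hg
    cases g with
    | zero =>
      have hn : cs[j]? = none := List.getElem?_eq_none_iff.mpr (by omega)
      simp [pvScanStr, hn]
    | succ g =>
      simp only [pvScanStr]
      cases hc : cs[j]? with
      | none => rfl
      | some c =>
        have hj : j < cs.length := pvGetSomeLt hc
        dsimp only
        split_ifs
        · exact ih g (j + 2) (by omega) (by omega)
        · rfl
        · exact ih g (j + 1) (by omega) (by omega)

lemma pvScanStr_ge (cs : List Char) (q : Char) : ∀ f j, j ≤ pvScanStr cs q f j := by
  intro f
  induction f with
  | zero => intro j; simp [pvScanStr]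
  | succ f ih =>
    intro j
    simp only [pvScanStr]
    cases cs[j]? with
    | none => exact le_refl j
    | some c =>
      dsimp only
      split_ifs
      · exact le_trans (by omega) (ih (j + 2))
      · omega
      · exact le_trans (by omega) (ih (j + 1))

lemma pvScanBlk_fuel (cs : List Char) :
    ∀ f g j, cs.length - j ≤ f → cs.length - j ≤ g →
      pvScanBlk cs f j = pvScanBlk cs g j := by
  intro f
  induction f with
  | zero =>
    intro g j hf hg
    cases g with
    | zero => rfl
    | succ g => simp only [pvScanBlk]; rw [if_neg (fun hcon => absurd hcon.1 (by omega))]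
  | succ f ih =>
    intro g j hf hg
    cases g with
    | zero => simp only [pvScanBlk]; rw [if_neg (fun hcon => absurd hcon.1 (by omega))]
    | succ g =>
      simp only [pvScanBlk]
      split_ifs with hc
      · exact ih g (j + 1) (by omega) (by omega)
      · rfl

lemma pvScanBlk_ge (cs : List Char) : ∀ f j, j ≤ pvScanBlk cs f j := by
  intro f
  induction f with
  | zero => intro j; simp [pvScanBlk]
  | succ f ih =>
    intro j
    simp only [pvScanBlk]
    split
    · exact le_trans (by omega) (ih (j + 1))
    · exact le_refl j

lemma pvNE_cons {x : List Char} {out : List (List Char)} (hx : x ≠ []) (h : pvNE out) :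
    pvNE (x :: out) := by
  intro s hs
  rcases List.mem_cons.1 hs with rfl | hs'
  · exact hx
  · exact h s hs'

set_option maxHeartbeats 2000000 in
lemma pvLoopA_fuel (cs op : List Char) :
    ∀ f g i ins esc inb out, cs.length - i ≤ f → cs.length - i ≤ g →
      pvLoopA cs op f i ins esc inb out = pvLoopA cs op g i ins esc inb out := by
  intro f
  induction f with
  | zero =>
    intro g i ins esc inb out hf hg
    rw [pvLoopA_none (List.getElem?_eq_none_iff.mpr (by omega)) 0,
        pvLoopA_none (List.getElem?_eq_none_iff.mpr (by omega)) g]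
  | succ f ih =>
    intro g i ins esc inb out hf hg
    cases g with
    | zero =>
      rw [pvLoopA_none (List.getElem?_eq_none_iff.mpr (by omega)) (f + 1),
          pvLoopA_none (List.getElem?_eq_none_iff.mpr (by omega)) 0]
    | succ g =>
      simp only [pvLoopA]
      cases hc : cs[i]? with
      | none => rfl
      | some ch =>
        have hi := pvGetSomeLt hc
        have s1 := pvSkipWs_ge (cs.drop (i + 1)) (i + 1)
        have s2 := pvSkipWs_ge (cs.drop (i + 2)) (i + 2)
        cases ins <;> cases inb <;> dsimp only <;> split_ifs <;>
          first
            | contradiction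
            | rfl
            | (apply ih <;> omega)

set_option maxHeartbeats 2000000 in
lemma pvLoopB_fuel (cs op : List Char) :
    ∀ f g i out, cs.length - i ≤ f → cs.length - i ≤ g →
      pvLoopB cs op f i out = pvLoopB cs op g i out := by
  intro f
  induction f with
  | zero =>
    intro g i out hf hg
    rw [pvLoopB_none (List.getElem?_eq_none_iff.mpr (by omega)) 0,
        pvLoopB_none (List.getElem?_eq_none_iff.mpr (by omega)) g]
  | succ f ih =>
    intro g i out hf hg
    cases g with
    | zero =>
      rw [pvLoopB_none (List.getElem?_eq_none_iff.mpr (by omega)) (f + 1),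
          pvLoopB_none (List.getElem?_eq_none_iff.mpr (by omega)) 0]
    | succ g =>
      simp only [pvLoopB]
      cases hc : cs[i]? with
      | none => rfl
      | some ch =>
        have hi := pvGetSomeLt hc
        have s1 := pvSkipWs_ge (cs.drop (i + 1)) (i + 1)
        have s2 := pvSkipWs_ge (cs.drop (i + 2)) (i + 2)
        have b2 := pvScanBlk_ge cs cs.length (i + 2)
        have t1 := pvScanStr_ge cs ch cs.length (i + 1)
        dsimp only <;> split_ifs <;>
          first
            | contradiction
            | rfl
            | (apply ih <;> omega)

-- A's result, seen through pvConv, depends on the accumulator only through its pvConv image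
set_option maxHeartbeats 2000000 in
lemma pvLoopA_congr (cs op : List Char) :
    ∀ f i ins esc inb out out', pvNE out → pvNE out' → pvConv out = pvConv out' →
      pvConv (pvLoopA cs op f i ins esc inb out) = pvConv (pvLoopA cs op f i ins esc inb out') := by
  intro f
  induction f with
  | zero => intro i ins esc inb out out' h1 h2 h3; exact h3
  | succ f ih =>
    intro i ins esc inb out out' h1 h2 h3
    simp only [pvLoopA]
    cases hc : cs[i]? with
    | none => exact h3
    | some ch =>
      cases ins <;> cases inb <;> dsimp only <;> split_ifs <;>
        first
          | contradiction
          | exact h3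
          | (simp only [pvConv_cons]; rw [h3])
          | (apply ih <;>
              first
                | exact pvNE_cons (by have hlt := pvGetSomeLt hc; simp <;> omega) h1
                | exact pvNE_cons (by have hlt := pvGetSomeLt hc; simp <;> omega) h2
                | exact pvNE_cons (by simp) (pvTrimA_ne _ h1)
                | exact pvNE_cons (by simp) (pvTrimA_ne _ h2)
                | (simp only [pvConv_cons, pvTrimA_conv _ h1, pvTrimA_conv _ h2, h3]))

lemma take1_head? (l : List Char) (b : Char) : l.take 1 = [b] ↔ l.head? = some b := by
  cases l <;> simp

lemma take2_pair {cs : List Char} {i : Nat} {ch : Char} (h : cs[i]? = some ch) (a b : Char) :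
    ((cs.drop i).take 2 = [a, b]) ↔ (ch = a ∧ cs[i + 1]? = some b) := by
  obtain ⟨hi, hch⟩ := List.getElem?_eq_some_iff.1 h
  rw [List.drop_eq_getElem_cons hi, hch]
  show (ch :: (cs.drop (i+1)).take 1 = [a, b]) ↔ _
  rw [show (i + 1 = i + 1) from rfl]
  constructor
  · intro he
    have h1 : ch = a := by injection he
    have h2 : (cs.drop (i+1)).take 1 = [b] := by injection he
    exact ⟨h1, by rw [← List.head?_drop]; exact (take1_head? _ _).1 h2⟩
  · rintro ⟨rfl, h2⟩
    have : (cs.drop (i+1)).take 1 = [b] := (take1_head? _ _).2 (by rw [List.head?_drop]; exact h2)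
    rw [this]

lemma pvScanStr_none {cs : List Char} {q : Char} {j : Nat} (h : cs[j]? = none) (f : Nat) :
    pvScanStr cs q f j = j := by
  cases f <;> simp [pvScanStr, h]

lemma pvEStr_of_ge {cs : List Char} {q : Char} {j : Nat} (h : cs.length ≤ j) :
    pvEStr cs q j = cs.length := by
  simp [pvEStr, pvScanStr_none (List.getElem?_eq_none_iff.mpr h)]
  omega

lemma pvScanStr_unfold {cs : List Char} {q : Char} {j : Nat} {c : Char} (hc : cs[j]? = some c) :
    pvScanStr cs q cs.length j =
      (if c = '\\' then pvScanStr cs q cs.length (j + 2)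
       else if c = q then j + 1 else pvScanStr cs q cs.length (j + 1)) := by
  have hj := pvGetSomeLt hc
  obtain ⟨m, hm⟩ : ∃ m, cs.length = m + 1 := ⟨cs.length - 1, by omega⟩
  conv_lhs => rw [hm]
  simp only [pvScanStr, hc]
  split_ifs
  · rw [pvScanStr_fuel cs q m cs.length (j + 2) (by omega) (by omega)]
  · rfl
  · rw [pvScanStr_fuel cs q m cs.length (j + 1) (by omega) (by omega)]

lemma pvEStr_close {cs : List Char} {q : Char} {j : Nat} (hc : cs[j]? = some q)
    (hq : q ≠ '\\') : pvEStr cs q j = j + 1 := by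
  have hj := pvGetSomeLt hc
  simp [pvEStr, pvScanStr_unfold hc, hq]
  omega

lemma pvSegCons {cs : List Char} {j e : Nat} {c : Char} (hc : cs[j]? = some c) (he : j + 1 ≤ e) :
    (cs.drop j).take (e - j) = c :: (cs.drop (j + 1)).take (e - (j + 1)) := by
  obtain ⟨hj, hch⟩ := List.getElem?_eq_some_iff.1 hc
  rw [List.drop_eq_getElem_cons hj, hch,
      show e - j = (e - (j + 1)) + 1 by omega, List.take_succ_cons]

lemma pvEStr_ge (cs : List Char) (q : Char) (j : Nat) (h : j ≤ cs.length) : j ≤ pvEStr cs q j := by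
  have := pvScanStr_ge cs q cs.length j
  simp [pvEStr]; omega

lemma pvEStr_le (cs : List Char) (q : Char) (j : Nat) : pvEStr cs q j ≤ cs.length := by
  simp [pvEStr]

lemma pvEBlk_ge (cs : List Char) (j : Nat) (h : j ≤ cs.length) : j ≤ pvEBlk cs j := by
  have := pvScanBlk_ge cs cs.length j
  simp only [pvEBlk]; split <;> omega

lemma pvScanBlk_stop (cs : List Char) :
    ∀ f j, cs.length - j ≤ f →
      cs.length ≤ pvScanBlk cs f j ∨ (cs.drop (pvScanBlk cs f j)).take 2 = ['*', '/'] := by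
  intro f
  induction f with
  | zero => intro j hf; simp only [pvScanBlk]; omega
  | succ f ih =>
    intro j hf
    simp only [pvScanBlk]
    split_ifs with hc
    · exact ih (j + 1) (by omega)
    · push Not at hc
      by_cases hj : j < cs.length
      · exact Or.inr (hc hj)
      · omega

lemma pvEBlk_le (cs : List Char) (j : Nat) : pvEBlk cs j ≤ cs.length := by
  rcases pvScanBlk_stop cs cs.length j (by omega) with h | h
  · simp only [pvEBlk]; split <;> omega
  · simp only [pvEBlk]
    split
    · omega
    · have : pvScanBlk cs cs.length j + 2 ≤ cs.length := by
        have hlen : ((cs.drop (pvScanBlk cs cs.length j)).take 2).length = 2 := by rw [h]; rfl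
        simp [List.length_take, List.length_drop] at hlen
        omega
      omega

-- A's string-mode loop crosses the whole literal, appending its characters one by one
lemma pvFFstr (cs op : List Char) (q : Char) (hqb : q ≠ '\\') :
    ∀ f g j out, cs.length - j ≤ f → cs.length - pvEStr cs q j ≤ g →
      pvLoopA cs op f j (some q) false false out =
        pvLoopA cs op g (pvEStr cs q j) none false false
          (pvChElems ((cs.drop j).take (pvEStr cs q j - j)) ++ out) := by
  intro f
  induction f using Nat.strong_induction_on with | _ f ihf =>
  intro g j out hf hg
  by_cases hj : cs.length ≤ j
  · have hnone : cs[j]? = none := List.getElem?_eq_none_iff.mpr hj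
    rw [pvLoopA_none hnone f, pvEStr_of_ge hj,
        pvLoopA_none (List.getElem?_eq_none_iff.mpr (le_refl _)) g,
        List.drop_eq_nil_of_le hj]
    simp [pvChElems]
  · have hjlt : j < cs.length := by omega
    obtain ⟨c, hc⟩ : ∃ c, cs[j]? = some c := ⟨cs[j], List.getElem?_eq_getElem hjlt⟩
    obtain ⟨f', rfl⟩ : ∃ f', f = f' + 1 := ⟨f - 1, by omega⟩
    by_cases hbs : c = '\\'
    · subst hbs
      by_cases hj1 : cs.length ≤ j + 1
      · -- the backslash is the last character of the text
        have hsc : pvScanStr cs q cs.length j = j + 2 := by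
          rw [pvScanStr_unfold hc, if_pos rfl,
              pvScanStr_none (List.getElem?_eq_none_iff.mpr (by omega))]
        have he : pvEStr cs q j = j + 1 := by simp [pvEStr, hsc]; omega
        simp only [pvLoopA, hc, Bool.false_eq_true, if_false]
        rw [if_pos trivial, pvLoopA_none (List.getElem?_eq_none_iff.mpr (by omega)) f', he,
            pvLoopA_none (List.getElem?_eq_none_iff.mpr (by omega)) g,
            pvSegCons hc (by omega)]
        rw [show j + 1 - (j + 1) = 0 by omega]
        simp [pvChElems]
      · -- an escaped character follows: two iterations of A cross both characters
        obtain ⟨c2, hc2⟩ : ∃ c2, cs[j + 1]? = some c2 :=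
          ⟨cs[j + 1]'(by omega), List.getElem?_eq_getElem (by omega)⟩
        obtain ⟨f'', rfl⟩ : ∃ f'', f' = f'' + 1 := ⟨f' - 1, by omega⟩
        have he : pvEStr cs q j = pvEStr cs q (j + 2) := by
          simp [pvEStr, pvScanStr_unfold hc]
        have hge : j + 2 ≤ pvEStr cs q j := by
          by_cases h2 : cs.length ≤ j + 2
          · rw [he, pvEStr_of_ge h2]; omega
          · rw [he]; exact pvEStr_ge cs q (j + 2) (by omega)
        simp only [pvLoopA, hc, Bool.false_eq_true, if_false]
        rw [if_pos trivial]
        simp only [pvLoopA, hc2, Bool.false_eq_true, if_false]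
        rw [if_pos trivial, show j + 1 + 1 = j + 2 by omega]
        rw [ihf f'' (by omega) g (j + 2) ([c2] :: ['\\'] :: out) (by omega)
            (by rw [he] at hg; exact hg)]
        rw [← he]
        congr 1
        rw [pvSegCons hc (by omega), pvSegCons hc2 (by omega), pvChElems_cons, pvChElems_cons]
        simp
    · by_cases hq : c = q
      · subst hq
        have he : pvEStr cs c j = j + 1 := pvEStr_close hc hbs
        simp only [pvLoopA, hc, Bool.false_eq_true, if_false]
        rw [if_neg hbs, if_pos trivial, he, pvSegCons hc (by omega)]
        rw [show j + 1 - (j + 1) = 0 by omega]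
        simp only [List.take_zero, pvChElems, List.map_nil, List.reverse_nil, List.map_cons,
          List.reverse_cons, List.nil_append, List.singleton_append]
        exact pvLoopA_fuel cs op f' g (j + 1) none false false _ (by omega) (by omega)
      · have he : pvEStr cs q j = pvEStr cs q (j + 1) := by
          simp [pvEStr, pvScanStr_unfold hc, hbs, hq]
        have hge : j + 1 ≤ pvEStr cs q j := by
          by_cases h2 : cs.length ≤ j + 1
          · rw [he, pvEStr_of_ge h2]; omega
          · rw [he]; exact pvEStr_ge cs q (j + 1) (by omega)
        simp only [pvLoopA, hc, Bool.false_eq_true, if_false]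
        rw [if_neg hbs, if_neg hq]
        rw [ihf f' (by omega) g (j + 1) ([c] :: out) (by omega) (by rw [he] at hg; exact hg)]
        rw [← he]
        congr 1
        rw [pvSegCons hc hge, pvChElems_cons]
        simp

lemma pvScanBlk_stuck {cs : List Char} {j : Nat} (h : cs.length ≤ j) (f : Nat) :
    pvScanBlk cs f j = j := by
  cases f with
  | zero => rfl
  | succ f => simp only [pvScanBlk]; rw [if_neg (fun hcon => absurd hcon.1 (by omega))]

lemma pvEBlk_of_ge {cs : List Char} {j : Nat} (h : cs.length ≤ j) : pvEBlk cs j = cs.length := by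
  simp only [pvEBlk, pvScanBlk_stuck h]
  rw [if_pos h]

lemma pvScanBlk_unfold {cs : List Char} {j : Nat} (hj : j < cs.length) :
    pvScanBlk cs cs.length j =
      if (cs.drop j).take 2 = ['*', '/'] then j else pvScanBlk cs cs.length (j + 1) := by
  obtain ⟨m, hm⟩ : ∃ m, cs.length = m + 1 := ⟨cs.length - 1, by omega⟩
  conv_lhs => rw [hm]
  simp only [pvScanBlk]
  by_cases ht : (cs.drop j).take 2 = ['*', '/']
  · rw [if_neg (fun hcon => hcon.2 ht), if_pos ht]
  · rw [if_pos ⟨hj, ht⟩, if_neg ht,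
        pvScanBlk_fuel cs m cs.length (j + 1) (by omega) (by omega)]

lemma pvEBlk_close {cs : List Char} {j : Nat} (hj : j < cs.length)
    (ht : (cs.drop j).take 2 = ['*', '/']) : pvEBlk cs j = j + 2 := by
  simp only [pvEBlk, pvScanBlk_unfold hj, if_pos ht]
  rw [if_neg (by omega)]

lemma pvEBlk_step {cs : List Char} {j : Nat} (hj : j < cs.length)
    (ht : ¬ (cs.drop j).take 2 = ['*', '/']) : pvEBlk cs j = pvEBlk cs (j + 1) := by
  simp only [pvEBlk, pvScanBlk_unfold hj, if_neg ht]

-- A's block-comment loop crosses the whole comment (conv-image; A's final "*/" fragment is two chars)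
lemma pvFFblk (cs op : List Char) :
    ∀ f g j out, cs.length - j ≤ f → cs.length - pvEBlk cs j ≤ g → pvNE out →
      pvConv (pvLoopA cs op f j none false true out) =
        pvConv (pvLoopA cs op g (pvEBlk cs j) none false false
          (pvChElems ((cs.drop j).take (pvEBlk cs j - j)) ++ out)) := by
  intro f
  induction f using Nat.strong_induction_on with | _ f ihf =>
  intro g j out hf hg hne
  by_cases hj : cs.length ≤ j
  · rw [pvLoopA_none (List.getElem?_eq_none_iff.mpr hj) f, pvEBlk_of_ge hj,
        pvLoopA_none (List.getElem?_eq_none_iff.mpr (le_refl _)) g,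
        List.drop_eq_nil_of_le hj]
    simp [pvChElems]
  · have hjlt : j < cs.length := by omega
    obtain ⟨c, hc⟩ : ∃ c, cs[j]? = some c := ⟨cs[j], List.getElem?_eq_getElem hjlt⟩
    obtain ⟨f', rfl⟩ : ∃ f', f = f' + 1 := ⟨f - 1, by omega⟩
    by_cases ht : (cs.drop j).take 2 = ['*', '/']
    · -- the comment closes here
      have he : pvEBlk cs j = j + 2 := pvEBlk_close hjlt ht
      simp only [pvLoopA, hc]
      rw [if_pos ht, he, ht]
      rw [pvLoopA_fuel cs op f' g (j + 2) none false false _ (by omega) (by omega ) ]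
      apply pvLoopA_congr
      · exact pvNE_cons (by simp) hne
      · exact pvNE_chElems_append _ _ hne
      · rw [pvConv_cons, pvConv_append, pvConv_chElems,
           show j + 2 - j = 2 by omega, ht]
    · -- an ordinary comment character
      have he : pvEBlk cs j = pvEBlk cs (j + 1) := pvEBlk_step hjlt ht
      have hge : j + 1 ≤ pvEBlk cs j := by
        by_cases h2 : cs.length ≤ j + 1
        · rw [he, pvEBlk_of_ge h2]; omega
        · rw [he]; exact pvEBlk_ge cs (j + 1) (by omega)
      simp only [pvLoopA, hc]
      rw [if_neg ht, if_pos trivial]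
      rw [ihf f' (by omega) g (j + 1) ([c] :: out) (by omega) (by rw [he] at hg; exact hg)
          (pvNE_cons (by simp) hne)]
      rw [← he]
      congr 2
      rw [pvSegCons hc hge, pvChElems_cons]
      simp

-- the main lock-step lemma: from any code-mode position the two loops produce the same characters
lemma pvMain (cs op : List Char) :
    ∀ d i f out, cs.length - i = d → cs.length - i ≤ f → pvNE out →
      pvConv (pvLoopA cs op f i none false false out) =
        pvLoopB cs op cs.length i (pvConv out) := by
  intro d
  induction d using Nat.strong_induction_on with | _ d ihd =>
  intro i f out hd hf hne
  by_cases hi : cs.length ≤ i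
  · rw [pvLoopA_none (List.getElem?_eq_none_iff.mpr hi) f,
        pvLoopB_none (List.getElem?_eq_none_iff.mpr hi) cs.length]
  · have hilt : i < cs.length := by omega
    obtain ⟨ch, hch⟩ : ∃ c, cs[i]? = some c := ⟨cs[i], List.getElem?_eq_getElem hilt⟩
    obtain ⟨f', rfl⟩ : ∃ f', f = f' + 1 := ⟨f - 1, by omega⟩
    obtain ⟨k, hk⟩ : ∃ k, cs.length - i = k + 1 := ⟨cs.length - i - 1, by omega⟩
    rw [pvLoopB_fuel cs op cs.length (k + 1) i _ (by omega) (by omega)]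
    simp only [pvLoopA, pvLoopB, hch, take2_pair hch, Bool.false_eq_true, if_false]
    have hcons : pvConv (pvLoopA cs op f' (i + 1) none false false ([ch] :: out)) =
        pvLoopB cs op k (i + 1) (ch :: pvConv out) := by
      rw [ihd (cs.length - (i + 1)) (by omega) (i + 1) f' ([ch] :: out) rfl (by omega)
          (pvNE_cons (by simp) hne),
          pvLoopB_fuel cs op cs.length k (i + 1) _ (by omega) (by omega)]
      simp [pvConv_cons]
    by_cases h1 : ch = '/' ∧ cs[i + 1]? = some '/'
    · rw [if_pos h1, if_pos h1]
      exact pvConv_cons _ _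
    · rw [if_neg h1, if_neg h1]
      by_cases h2 : ch = '/' ∧ cs[i + 1]? = some '*'
      · -- a block comment: B consumes it wholesale, A is fast-forwarded across it
        rw [if_pos h2, if_pos h2]
        have hi2 : i + 2 ≤ cs.length := by have := pvGetSomeLt h2.2; omega
        have ht2 : (cs.drop i).take 2 = ['/', '*'] := (take2_pair hch '/' '*').2 h2
        have he1 : i + 2 ≤ pvEBlk cs (i + 2) := pvEBlk_ge cs (i + 2) hi2
        have he2 : pvEBlk cs (i + 2) ≤ cs.length := pvEBlk_le cs (i + 2)
        rw [ht2, pvFFblk cs op f' f' (i + 2) (['/', '*'] :: out) (by omega) (by omega)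
            (pvNE_cons (by simp) hne)]
        rw [ihd (cs.length - pvEBlk cs (i + 2)) (by omega) (pvEBlk cs (i + 2)) f' _ rfl
            (by omega) (pvNE_chElems_append _ _ (pvNE_cons (by simp) hne))]
        have efold : (if cs.length ≤ pvScanBlk cs cs.length (i + 2) then cs.length
            else pvScanBlk cs cs.length (i + 2) + 2) = pvEBlk cs (i + 2) := rfl
        rw [efold, pvLoopB_fuel cs op k cs.length (pvEBlk cs (i + 2)) _ (by omega) (by omega)]
        congr 1
        rw [pvConv_append, pvConv_chElems, pvConv_cons,
            pvSegCons hch (by omega), pvSegCons h2.2 (by omega),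
            show i + 1 + 1 = i + 2 by omega]
        rcases h2 with ⟨rfl, -⟩
        simp
      · rw [if_neg h2, if_neg h2]
        by_cases h3 : ch = '"' ∨ ch = '\''
        · -- a string literal: B consumes it wholesale, A is fast-forwarded across it
          rw [if_pos h3, if_pos h3]
          have hqb : ch ≠ '\\' := by rcases h3 with rfl | rfl <;> decide
          have he1 : i + 1 ≤ pvEStr cs ch (i + 1) := pvEStr_ge cs ch (i + 1) (by omega)
          have he2 : pvEStr cs ch (i + 1) ≤ cs.length := pvEStr_le cs ch (i + 1)
          rw [pvFFstr cs op ch hqb f' f' (i + 1) ([ch] :: out) (by omega) (by omega)]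
          rw [ihd (cs.length - pvEStr cs ch (i + 1)) (by omega) (pvEStr cs ch (i + 1)) f' _ rfl
              (by omega) (pvNE_chElems_append _ _ (pvNE_cons (by simp) hne))]
          have efold : min (pvScanStr cs ch cs.length (i + 1)) cs.length = pvEStr cs ch (i + 1) := rfl
          rw [efold, pvLoopB_fuel cs op k cs.length (pvEStr cs ch (i + 1)) _ (by omega) (by omega)]
          congr 1
          rw [pvConv_append, pvConv_chElems, pvConv_cons, pvSegCons hch (by omega)]
          simp
        · rw [if_neg h3, if_neg h3]
          by_cases h4 : op = ['-', '>'] ∧ ch = '-' ∧ cs[i + 1]? = some '>'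
          · -- the "->" normalisation step: trim, emit " -> ", skip following whitespace
            rw [if_pos h4, if_pos h4]
            dsimp only
            have hi2 : i + 2 ≤ cs.length := by have := pvGetSomeLt h4.2.2; omega
            have hsge := pvSkipWs_ge (cs.drop (i + 2)) (i + 2)
            have hsle := pvSkipWs_le (cs.drop (i + 2)) (i + 2)
            rw [List.length_drop] at hsle
            rw [ihd (cs.length - pvSkipWs (cs.drop (i + 2)) (i + 2)) (by omega)
                (pvSkipWs (cs.drop (i + 2)) (i + 2)) f' _ rfl (by omega)
                (pvNE_cons (by simp) (pvTrimA_ne _ hne))]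
            rw [pvLoopB_fuel cs op k cs.length (pvSkipWs (cs.drop (i + 2)) (i + 2)) _ (by omega)
                (by omega)]
            congr 1
            rw [pvConv_cons, pvTrimA_conv _ hne, h4.1]
            simp
          · rw [if_neg h4, if_neg h4]
            by_cases h5 : op = ['='] ∧ ch = '='
            · by_cases hg5 : ((decide (i = 0) ||
                    match cs[i - 1]? with
                    | some p => decide (p = '=') || decide (p = '<') || decide (p = '>') ||
                        decide (p = '!')
                    | none => false) ||
                  decide (cs[i + 1]? = some '=')) = true
              · -- comparison operator: both sides copy the '=' unchanged
                rw [if_pos h5, if_pos hg5,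
                    if_neg (fun hcon => absurd hg5 hcon.2.2)]
                exact hcons
              · -- the "=" normalisation step
                rw [if_pos h5, if_neg hg5, if_pos ⟨h5.1, h5.2, hg5⟩]
                dsimp only
                have hi1 : i + 1 ≤ cs.length := by omega
                have hsge := pvSkipWs_ge (cs.drop (i + 1)) (i + 1)
                have hsle := pvSkipWs_le (cs.drop (i + 1)) (i + 1)
                rw [List.length_drop] at hsle
                rw [ihd (cs.length - pvSkipWs (cs.drop (i + 1)) (i + 1)) (by omega)
                    (pvSkipWs (cs.drop (i + 1)) (i + 1)) f' _ rfl (by omega)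
                    (pvNE_cons (by simp) (pvTrimA_ne _ hne))]
                rw [pvLoopB_fuel cs op k cs.length (pvSkipWs (cs.drop (i + 1)) (i + 1)) _ (by omega)
                    (by omega)]
                congr 1
                rw [pvConv_cons, pvTrimA_conv _ hne, h5.1]
                simp
            · rw [if_neg h5, if_neg (fun hcon => h5 ⟨hcon.1, hcon.2.1⟩)]
              exact hcons

-- ===== VERDICT (by name: the statement is the Claim_ definition above) =====
theorem normalize_operator_py_spec : Claim_equal_normalize_operator_py := by
  intro text op _
  unfold Spec_normalize_operator_py normalize_operator_py normalize_operator_py_alt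
  have h := pvMain text.toList op.toList (text.toList.length) 0 text.toList.length [] rfl (le_refl _)
    (by intro s hs; simp at hs)
  simp only [pvConv, List.map_nil, List.flatten_nil] at h
  congr 1
  rw [← h, List.reverse_flatten]
  simp [List.map_map, Function.comp]
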